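-- pv_equiv track=rewrite | github.com/glebapaulina/algorytmy | zadania.py | przesuniecia
-- ===== SOURCE A (Python) =====
-- def przesuniecia(tab):
--     tablica=[]
--     for i in range(len(tab)):
--         tablica.append([])
--     for i in tab:
--         tablica[0].append(i)
--
--     n=1
--     while n<=len(tab)-1:
--         k = 1
--         for i in tab:
--             if k == len(tab):
--                 tablica[n].append(tablica[n-1][0])
--                 break
--             tablica[n].append(tablica[n-1][k])
--             k+=1
--         n+=1
--     return tablica
-- ===== SOURCE B (Python) =====
-- def przesuniecia(tab):
--     return [tab[i:] + tab[:i] for i in range(len(tab))]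
-- ===== Notes on version B (the rewrite author's own statement) =====
-- stated objective: simpler
-- what changed: Each rotation row is computed independently by slice concatenation tab[i:]+tab[:i] in one comprehension, instead of A's pre-allocated matrix filled row-from-previous-row with a manual counter, element-by-element appends and a wraparound break.
import Mathlib
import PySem

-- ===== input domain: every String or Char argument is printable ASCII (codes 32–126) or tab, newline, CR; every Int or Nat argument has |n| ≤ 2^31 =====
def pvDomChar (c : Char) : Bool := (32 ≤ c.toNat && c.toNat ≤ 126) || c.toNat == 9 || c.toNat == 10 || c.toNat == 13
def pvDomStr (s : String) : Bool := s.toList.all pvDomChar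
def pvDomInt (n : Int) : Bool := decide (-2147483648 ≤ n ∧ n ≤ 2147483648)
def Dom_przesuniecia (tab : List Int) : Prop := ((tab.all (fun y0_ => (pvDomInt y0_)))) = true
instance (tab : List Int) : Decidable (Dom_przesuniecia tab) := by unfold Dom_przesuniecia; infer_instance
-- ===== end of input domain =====

-- B replaces A's pre-allocated matrix filled row-from-previous-row (manual counter, wraparound
-- break) by one comprehension computing each rotation independently as tab[i:] + tab[:i] (simpler).


-- ===== PORT A =====
-- inner 'for i in tab' loop of the while body: counter k starts at 1; when k == len(tab)
-- append prev[0] and break, otherwise append prev[k] and continue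
def przInner (prev : List Int) (len : Nat) : List Int → Nat → List Int
  | [], _ => []
  | _ :: rest, k =>
    if k = len then [(PySem.List.pyGet? prev 0).getD 0]
    else (PySem.List.pyGet? prev (k : Int)).getD 0 :: przInner prev len rest (k + 1)

-- 'while n <= len(tab)-1' loop, counted down (it runs exactly len(tab)-1 times);
-- each iteration builds row n from row n-1 (prev)
def przWhile (tab : List Int) : Nat → List Int → List (List Int)
  | 0, _ => []
  | m + 1, prev =>
    let row := przInner prev tab.length tab 1
    row :: przWhile tab m row

def przesuniecia (tab : List Int) : List (List Int) :=
  -- row 0 is built by appending every element of tab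
  let row0 := tab.foldl (fun acc i => acc ++ [i]) []
  match tab with
  | [] => []  -- no rows were allocated, the while loop does not run
  | _ => row0 :: przWhile tab (tab.length - 1) row0

-- ===== PORT B =====
def przesuniecia_alt (tab : List Int) : List (List Int) :=
  (PySem.List.pyRange 0 tab.length 1).map
    (fun i => PySem.List.slice tab (some i) none ++ PySem.List.slice tab none (some i))

-- ===== PRECONDITION & SPEC =====
def Spec_przesuniecia (tab : List Int) (out : List (List Int)) : Prop := out = przesuniecia_alt tab
instance (tab : List Int) (out : List (List Int)) : Decidable (Spec_przesuniecia tab out) := by unfold Spec_przesuniecia; infer_instance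

-- ===== CLAIM (what is proved, stated in full; the proofs are below) =====
def Claim_equal_przesuniecia : Prop := ∀ (tab : List Int), Dom_przesuniecia tab → Spec_przesuniecia tab (przesuniecia tab)

-- ===== LEMMAS AND PROOFS =====

-- the inner loop, started at counter k, emits prev[k..len-1] followed by prev[0]
theorem przInner_eq (prev : List Int) (l : List Int) (k : Nat)
    (hk1 : 1 ≤ k) (hk2 : k ≤ prev.length) (hk : k + l.length = prev.length + 1) :
    przInner prev prev.length l k = prev.drop k ++ prev.take 1 := by
  induction l generalizing k with
  | nil => exfalso; simp at hk; omega
  | cons x rest ih =>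
    simp only [przInner]
    by_cases h : k = prev.length
    · have hlen : 1 ≤ prev.length := by omega
      simp only [h, if_true]
      rw [List.drop_length]
      cases prev with
      | nil => simp at hlen
      | cons a t => simp [PySem.List.pyGet?, PySem.List.pyIdx?]
    · have hlt : k < prev.length := by omega
      simp only [if_neg h]
      rw [ih (k + 1) (by omega) (by omega) (by simp at hk ⊢; omega)]
      simp [List.getElem?_eq_getElem hlt]
      rw [List.drop_eq_getElem_cons hlt, List.cons_append]

-- one rotation step: rotating row j gives row j+1
theorem rot_step (tab : List Int) (j : Nat) (hj : j < tab.length) :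
    przInner (tab.drop j ++ tab.take j) tab.length tab 1
      = tab.drop (j + 1) ++ tab.take (j + 1) := by
  have hlen : (tab.drop j ++ tab.take j).length = tab.length := by
    simp; omega
  have h := przInner_eq (tab.drop j ++ tab.take j) tab 1 (le_refl 1)
    (by rw [hlen]; omega) (by rw [hlen]; omega)
  rw [hlen] at h
  rw [h]
  have hd : tab.drop j = tab[j] :: tab.drop (j + 1) := List.drop_eq_getElem_cons hj
  have ht : tab.take (j + 1) = tab.take j ++ [tab[j]] := by
    rw [List.take_add_one, List.getElem?_eq_getElem hj]; rfl
  rw [hd, ht]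
  simp only [List.cons_append, List.drop_one, List.tail_cons, List.take_succ_cons,
    List.take_zero, List.append_assoc]

-- the while loop, started at row j with m iterations left, emits rows j+1 … j+m
theorem przWhile_eq (tab : List Int) (m j : Nat) (hm : j + m ≤ tab.length) :
    przWhile tab m (tab.drop j ++ tab.take j)
      = (List.range m).map (fun i => tab.drop (j + 1 + i) ++ tab.take (j + 1 + i)) := by
  induction m generalizing j with
  | zero => simp [przWhile]
  | succ m ih =>
    simp only [przWhile]
    rw [rot_step tab j (by omega)]
    rw [ih (j + 1) (by omega)]
    rw [List.range_succ_eq_map]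
    simp only [List.map_cons, List.map_map, List.cons.injEq]
    refine ⟨by simp, ?_⟩
    apply List.map_congr_left
    intro i _
    simp only [Function.comp_apply]
    have e : j + 1 + (i + 1) = j + 1 + 1 + i := by omega
    rw [e]

-- B computes the same list of rotations
theorem alt_eq (tab : List Int) :
    przesuniecia_alt tab
      = (List.range tab.length).map (fun i => tab.drop i ++ tab.take i) := by
  unfold przesuniecia_alt
  rw [PySem.List.pyRange_one]
  simp only [Int.sub_zero, Int.toNat_natCast, List.map_map]
  apply List.map_congr_left
  intro i _
  simp only [Function.comp, Int.zero_add]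
  rw [PySem.List.slice_from_natCast, PySem.List.slice_to_natCast]

-- ===== VERDICT (by name: the statement is the Claim_ definition above) =====
theorem przesuniecia_spec : Claim_equal_przesuniecia := by
  intro tab _
  show przesuniecia tab = przesuniecia_alt tab
  rw [alt_eq]
  cases tab with
  | nil => simp [przesuniecia]
  | cons a t =>
    have hred : przesuniecia (a :: t)
        = (a :: t) :: przWhile (a :: t) ((a :: t).length - 1) (a :: t) := by
      simp only [przesuniecia]
      rw [PySem.List.foldl_append_singleton_eq_self, List.nil_append]
    rw [hred]
    have hw := przWhile_eq (a :: t) ((a :: t).length - 1) 0 (by simp)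
    simp only [List.drop_zero, List.take_zero, List.append_nil, Nat.zero_add] at hw
    rw [hw]
    have hlen : (a :: t).length = ((a :: t).length - 1) + 1 := by simp
    rw [hlen, List.range_succ_eq_map]
    simp only [List.map_cons, List.map_map, List.cons.injEq]
    refine ⟨by simp, ?_⟩
    apply List.map_congr_left
    intro i _
    simp only [Function.comp_apply]
    have e : 1 + i = i.succ := by omega
    rw [e]
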